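-- pv_equiv track=rewrite | github.com/pypi-data/pypi-mirror-361 | packages/secret-run/secret_run-0.1.0-py3-none-any.whl/secret_run/core/secrets.py | _is_weak_password
-- ===== SOURCE A (Python) =====
-- def _is_weak_password(key: str, value: str) -> bool:
--     """Check if a secret is a weak password."""
--     if not any(key.lower().endswith(suffix) for suffix in ['password', 'pass', 'pwd']):
--         return False
--
--     # Check length
--     if len(value) < 8:
--         return True
--
--     # Check complexity
--     has_upper = any(c.isupper() for c in value)
--     has_lower = any(c.islower() for c in value)
--     has_digit = any(c.isdigit() for c in value)
--     has_special = any(c in '!@#$%^&*()_+-=[]{}|;:,.<>?' for c in value)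
--
--     return not (has_upper and has_lower and has_digit and has_special)
-- ===== SOURCE B (Python) =====
-- _SPECIALS = frozenset('!@#$%^&*()_+-=[]{}|;:,.<>?')
--
-- def _is_weak_password(key: str, value: str) -> bool:
--     """Check if a secret is a weak password."""
--     k = key.lower()
--     if not (k.endswith('password') or k.endswith('pass') or k.endswith('pwd')):
--         return False
--     if len(value) < 8:
--         return True
--     has_upper = has_lower = has_digit = has_special = False
--     for c in value:
--         if c.isupper():
--             has_upper = True
--         if c.islower():
--             has_lower = True
--         if c.isdigit():
--             has_digit = True
--         if c in _SPECIALS: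
--             has_special = True
--         if has_upper and has_lower and has_digit and has_special:
--             return False
--     return True
-- ===== Notes on version B (the rewrite author's own statement) =====
-- stated objective: alternative
-- what changed: Replaces the generator-any suffix test with explicit boolean endswith checks and the four separate any(...) scans over value with a single loop that updates four flags and returns False early once all four hold.
import Mathlib
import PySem

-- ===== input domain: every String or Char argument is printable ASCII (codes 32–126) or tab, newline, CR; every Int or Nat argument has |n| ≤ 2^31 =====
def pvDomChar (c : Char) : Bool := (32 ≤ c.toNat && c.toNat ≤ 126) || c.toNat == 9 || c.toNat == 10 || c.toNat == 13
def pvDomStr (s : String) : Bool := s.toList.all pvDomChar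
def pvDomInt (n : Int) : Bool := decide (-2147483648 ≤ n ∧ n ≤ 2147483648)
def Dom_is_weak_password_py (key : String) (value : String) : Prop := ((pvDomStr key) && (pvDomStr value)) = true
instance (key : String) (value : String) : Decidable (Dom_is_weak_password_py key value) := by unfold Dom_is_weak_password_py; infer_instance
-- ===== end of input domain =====

-- B: single early-exit pass over value maintaining four flags instead of four any(...) scans; explicit or-chain for the suffix test.
-- ===== PORT A =====
def pvSpecials : List Char := "!@#$%^&*()_+-=[]{}|;:,.<>?".toList

def is_weak_password_py (key : String) (value : String) : Bool :=
  -- if not any(key.lower().endswith(suffix) for suffix in ['password','pass','pwd']): return False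
  if !(["password", "pass", "pwd"].any (fun suffix => PySem.Str.endswith (PySem.Str.lower key) suffix)) then
    false
  else if PySem.Str.len value < 8 then
    true
  else
    let has_upper := value.toList.any PySem.Chars.isupper
    let has_lower := value.toList.any PySem.Chars.islower
    let has_digit := value.toList.any PySem.Chars.isdigit
    -- c in '!@#...' : membership of the single char in the literal, exact for 1-char needles
    let has_special := value.toList.any (fun c => pvSpecials.contains c)
    !(has_upper && has_lower && has_digit && has_special)

-- ===== PORT B =====
def pvWeakLoop : List Char → Bool → Bool → Bool → Bool → Bool
  | [], _, _, _, _ => true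
  | c :: cs, u, l, d, s =>
    let u := u || PySem.Chars.isupper c
    let l := l || PySem.Chars.islower c
    let d := d || PySem.Chars.isdigit c
    let s := s || pvSpecials.contains c
    if u && l && d && s then false else pvWeakLoop cs u l d s

def is_weak_password_py_alt (key : String) (value : String) : Bool :=
  let k := PySem.Str.lower key
  if !(PySem.Str.endswith k "password" || PySem.Str.endswith k "pass" || PySem.Str.endswith k "pwd") then
    false
  else if PySem.Str.len value < 8 then
    true
  else
    pvWeakLoop value.toList false false false false

-- ===== PRECONDITION & SPEC =====
def Spec_is_weak_password_py (key : String) (value : String) (out : Bool) : Prop := out = is_weak_password_py_alt key value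
instance (key : String) (value : String) (out : Bool) : Decidable (Spec_is_weak_password_py key value out) := by unfold Spec_is_weak_password_py; infer_instance

-- ===== CLAIM (what is proved, stated in full; the proofs are below) =====
def Claim_equal_is_weak_password_py : Prop := ∀ (key : String) (value : String), Dom_is_weak_password_py key value → Spec_is_weak_password_py key value (is_weak_password_py key value)

-- ===== LEMMAS AND PROOFS =====
lemma pvWeakLoop_eq (cs : List Char) (u l d s : Bool) (h : (u && l && d && s) = false) :
    pvWeakLoop cs u l d s =
      !((u || cs.any PySem.Chars.isupper) && (l || cs.any PySem.Chars.islower) &&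
        (d || cs.any PySem.Chars.isdigit) && (s || cs.any (fun c => pvSpecials.contains c))) := by
  induction cs generalizing u l d s with
  | nil => simp [pvWeakLoop, h]
  | cons c cs ih =>
    simp only [pvWeakLoop, List.any_cons]
    split_ifs with hall
    · simp only [Bool.and_eq_true] at hall
      obtain ⟨⟨⟨hu, hl⟩, hd⟩, hs⟩ := hall
      simp only [← Bool.or_assoc, hu, hl, hd, hs]
      simp
    · rw [ih _ _ _ _ (Bool.eq_false_iff.mpr hall)]
      simp [Bool.or_assoc]

-- ===== VERDICT (by name: the statement is the Claim_ definition above) =====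
theorem is_weak_password_py_spec : Claim_equal_is_weak_password_py := by
  intro key value _
  unfold Spec_is_weak_password_py is_weak_password_py is_weak_password_py_alt
  simp only [List.any_cons, List.any_nil, Bool.or_false]
  rw [pvWeakLoop_eq _ _ _ _ _ rfl]
  simp [Bool.or_assoc]
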